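-- pv_equiv track=rewrite | github.com/kazzand/ouroboros-desktop | ouroboros/tools/review_helpers.py | _make_fence
-- ===== SOURCE A (Python) =====
-- def _make_fence(content: str) -> str:
--     longest = 0
--     current = 0
--     for ch in str(content or ""):
--         if ch == "`":
--             current += 1
--             longest = max(longest, current)
--         else:
--             current = 0
--     return "`" * max(3, longest + 1)
-- ===== SOURCE B (Python) =====
-- def _make_fence(content: str) -> str:
--     s = str(content or "")
--     # extract the maximal backtick runs in one shot, then reduce over their lengths
--     runs = "".join(ch if ch == "`" else " " for ch in s).split()
--     longest = max(map(len, runs), default=0)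
--     return "`" * max(3, longest + 1)
-- ===== Notes on version B (the rewrite author's own statement) =====
-- stated objective: idiomatic
-- what changed: Replaces the stateful char-by-char scan with a run-extraction pass: non-backticks are blanked and str.split() yields all maximal backtick runs at once, reduced by max(..., default=0).
import Mathlib
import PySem

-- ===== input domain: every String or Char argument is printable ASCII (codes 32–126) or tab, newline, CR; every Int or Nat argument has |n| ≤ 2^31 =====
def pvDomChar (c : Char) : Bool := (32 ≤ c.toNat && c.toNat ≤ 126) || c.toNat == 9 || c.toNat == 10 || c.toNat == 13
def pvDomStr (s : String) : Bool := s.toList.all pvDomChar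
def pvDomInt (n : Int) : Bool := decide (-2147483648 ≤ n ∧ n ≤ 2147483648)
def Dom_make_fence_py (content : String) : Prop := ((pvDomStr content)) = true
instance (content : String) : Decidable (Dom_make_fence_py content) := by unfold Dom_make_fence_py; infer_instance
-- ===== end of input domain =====

-- B extracts all maximal backtick runs at once (blank non-backticks, split on whitespace)
-- instead of A's stateful char-by-char scan; objective: idiomatic, same cost.


-- ===== PORT A =====
-- str(content or "") on a str argument is the string itself (empty stays empty), so we
-- iterate over content's characters directly. The loop state is (longest, current).
def make_fence_py (content : String) : String :=
  let st := content.toList.foldl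
    (fun (p : Nat × Nat) ch =>
      if ch = '`' then (max p.1 (p.2 + 1), p.2 + 1) else (p.1, 0))
    (0, 0)
  String.ofList (List.replicate (max 3 (st.1 + 1)) '`')

-- ===== PORT B =====
-- "".join(ch if ch == "`" else " " for ch in s) = map over the characters;
-- .split() = PySem.Chars.split₀; max(map(len, runs), default=0) = fold max over the lengths.
def make_fence_py_alt (content : String) : String :=
  let runs := PySem.Chars.split₀
    (content.toList.map (fun ch => if ch = '`' then ch else ' '))
  let longest := (runs.map List.length).foldl max 0
  String.ofList (List.replicate (max 3 (longest + 1)) '`')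

-- ===== PRECONDITION & SPEC =====
def Spec_make_fence_py (content : String) (out : String) : Prop := out = make_fence_py_alt content
instance (content : String) (out : String) : Decidable (Spec_make_fence_py content out) := by unfold Spec_make_fence_py; infer_instance

-- ===== CLAIM (what is proved, stated in full; the proofs are below) =====
def Claim_equal_make_fence_py : Prop := ∀ (content : String), Dom_make_fence_py content → Spec_make_fence_py content (make_fence_py content)

-- ===== LEMMAS AND PROOFS =====

-- max over a list of naturals, as B folds it
def pvMaxL (l : List Nat) : Nat := l.foldl max 0

theorem pv_foldl_max_comm (l : List Nat) (a b : Nat) :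
    l.foldl max (max a b) = max a (l.foldl max b) := by
  induction l generalizing b with
  | nil => simp
  | cons x xs ih =>
      simp only [List.foldl_cons, max_assoc]
      exact ih (max b x)

theorem pvMaxL_cons (a : Nat) (l : List Nat) : pvMaxL (a :: l) = max a (pvMaxL l) := by
  simp only [pvMaxL, List.foldl_cons, Nat.zero_max]
  have := pv_foldl_max_comm l a 0
  simpa using this

theorem pvMaxL_append (l₁ l₂ : List Nat) :
    pvMaxL (l₁ ++ l₂) = max (pvMaxL l₁) (pvMaxL l₂) := by
  induction l₁ with
  | nil => simp [pvMaxL]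
  | cons x xs ih => simp [pvMaxL_cons, ih, max_assoc]

-- accumulator lemma for split₀.go
theorem pv_go_acc (ys cur : List Char) (acc : List (List Char)) :
    PySem.Chars.split₀.go ys cur acc
      = acc.reverse ++ PySem.Chars.split₀.go ys cur [] := by
  induction ys generalizing cur acc with
  | nil =>
      by_cases h : cur.isEmpty <;> simp [PySem.Chars.split₀.go, h]
  | cons c rest ih =>
      by_cases hs : PySem.Chars.isspace c
      · by_cases h : cur.isEmpty
        · simp only [PySem.Chars.split₀.go, hs, h, if_true]
          exact ih [] acc
        · simp only [PySem.Chars.split₀.go, hs, h, if_true]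
          rw [ih [] (cur.reverse :: acc), ih [] [cur.reverse]]
          simp
      · simp only [PySem.Chars.split₀.go, hs, if_false]
        exact ih (c :: cur) acc

-- the character translation used by B
def pvT (ch : Char) : Char := if ch = '`' then ch else ' '

-- the runs produced by B on xs, with a partial run cur (reversed) pending
def pvRuns (xs cur : List Char) : List (List Char) :=
  PySem.Chars.split₀.go (xs.map pvT) cur []

-- a nonempty pending run always contributes at least its length
theorem pvRuns_lower (xs : List Char) (cur : List Char) (h : cur ≠ []) :
    cur.length ≤ pvMaxL ((pvRuns xs cur).map List.length) := by
  induction xs generalizing cur with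
  | nil =>
      have h' : cur.isEmpty = false := by simpa [List.isEmpty_iff] using h
      simp [pvRuns, PySem.Chars.split₀.go, h', pvMaxL_cons]
  | cons ch rest ih =>
      by_cases hb : ch = '`'
      · have hnsp : PySem.Chars.isspace '`' = false := by decide
        have : pvRuns (ch :: rest) cur = pvRuns rest (pvT ch :: cur) := by
          simp [pvRuns, pvT, hb, PySem.Chars.split₀.go, hnsp]
        rw [this]
        have := ih (pvT ch :: cur) (by simp)
        simp only [List.length_cons] at this
        omega
      · have hsp : PySem.Chars.isspace (pvT ch) = true := by
          simp [pvT, hb]; decide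
        have h' : cur.isEmpty = false := by simpa [List.isEmpty_iff] using h
        have : pvRuns (ch :: rest) cur
            = [cur.reverse] ++ pvRuns rest [] := by
          simp only [pvRuns, List.map_cons, PySem.Chars.split₀.go, hsp, h',
            if_true, Bool.false_eq_true, if_false]
          rw [pv_go_acc]
          simp
        rw [this]
        simp [pvMaxL_cons, pvMaxL_append]

-- main invariant: A's running (longest, current) matches B's "max over runs"
theorem pv_main (xs : List Char) (cur : List Char) (l : Nat) (hl : cur.length ≤ l) :
    (xs.foldl
      (fun (p : Nat × Nat) ch =>
        if ch = '`' then (max p.1 (p.2 + 1), p.2 + 1) else (p.1, 0))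
      (l, cur.length)).1
    = max l (pvMaxL ((pvRuns xs cur).map List.length)) := by
  induction xs generalizing cur l with
  | nil =>
      by_cases h : cur = []
      · simp [pvRuns, PySem.Chars.split₀.go, h, pvMaxL]
      · have h' : cur.isEmpty = false := by simpa [List.isEmpty_iff] using h
        simp only [List.foldl_nil, pvRuns, List.map_nil, PySem.Chars.split₀.go, h',
          Bool.false_eq_true, if_false]
        simp [pvMaxL_cons, pvMaxL]
        omega
  | cons ch rest ih =>
      by_cases hb : ch = '`'
      · have hnsp : PySem.Chars.isspace '`' = false := by decide
        have hr : pvRuns (ch :: rest) cur = pvRuns rest (pvT ch :: cur) := by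
          simp [pvRuns, pvT, hb, PySem.Chars.split₀.go, hnsp]
        have hlen : (pvT ch :: cur).length = cur.length + 1 := by simp
        have step : ((ch :: rest).foldl
            (fun (p : Nat × Nat) ch =>
              if ch = '`' then (max p.1 (p.2 + 1), p.2 + 1) else (p.1, 0))
            (l, cur.length))
          = rest.foldl
            (fun (p : Nat × Nat) ch =>
              if ch = '`' then (max p.1 (p.2 + 1), p.2 + 1) else (p.1, 0))
            (max l (cur.length + 1), (pvT ch :: cur).length) := by
          simp [hb, hlen]
        rw [step, ih (pvT ch :: cur) (max l (cur.length + 1)) (by simp), hr]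
        have hge := pvRuns_lower rest (pvT ch :: cur) (by simp)
        simp only [List.length_cons] at hge
        omega
      · have hsp : PySem.Chars.isspace (pvT ch) = true := by
          simp [pvT, hb]; decide
        have step : ((ch :: rest).foldl
            (fun (p : Nat × Nat) ch =>
              if ch = '`' then (max p.1 (p.2 + 1), p.2 + 1) else (p.1, 0))
            (l, cur.length))
          = rest.foldl
            (fun (p : Nat × Nat) ch =>
              if ch = '`' then (max p.1 (p.2 + 1), p.2 + 1) else (p.1, 0))
            (l, List.length ([] : List Char)) := by
          simp [hb]
        by_cases h : cur = []
        · have hr : pvRuns (ch :: rest) cur = pvRuns rest [] := by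
            simp [pvRuns, PySem.Chars.split₀.go, hsp, h]
          rw [step, ih [] l (by simp), hr]
        · have h' : cur.isEmpty = false := by simpa [List.isEmpty_iff] using h
          have hr : pvRuns (ch :: rest) cur = [cur.reverse] ++ pvRuns rest [] := by
            simp only [pvRuns, List.map_cons, PySem.Chars.split₀.go, hsp, h',
              if_true, Bool.false_eq_true, if_false]
            rw [pv_go_acc]
            simp
          rw [step, ih [] l (by simp), hr]
          simp [pvMaxL_cons, pvMaxL_append]
          omega

-- ===== VERDICT (by name: the statement is the Claim_ definition above) =====
theorem make_fence_py_spec : Claim_equal_make_fence_py := by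
  intro content _
  unfold Spec_make_fence_py make_fence_py make_fence_py_alt
  have h := pv_main content.toList [] 0 (by simp)
  simp only [List.length_nil] at h
  have hmap : content.toList.map (fun ch => if ch = '`' then ch else ' ')
      = content.toList.map pvT := by simp [pvT]
  simp only [PySem.Chars.split₀, hmap]
  rw [h]
  simp [pvRuns, pvMaxL]
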